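-- pv_equiv track=rewrite | github.com/minacode/panda-parser | supertagging/induction.py | span_child_substitution_sequence
-- ===== SOURCE A (Python) =====
-- def span_child_substitution_sequence(span, children_spans):
--     low, high = span
--     k = low
--     sequence = []
--     while k <= high:
--         matched = False
--         for i, child_spans in enumerate(children_spans):
--             for j, child_span in enumerate(child_spans):
--                 child_low, child_high = child_span
--                 if k == child_low:
--                     sequence.append(
--                         ((child_low, child_high), (i, j))
--                     )
--                     k = child_high + 1
--                     matched = True
--         if not matched:
--             if not sequence or sequence[-1][1] is not None:
--                 sequence.append(
--                     ((k, k), None)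
--                 )
--             else:
--                 span, child = sequence[-1]
--                 span_low, _ = span
--                 sequence[-1] = ((span_low, k), None)
--             k += 1
--     return sequence
-- ===== SOURCE B (Python) =====
-- def span_child_substitution_sequence(span, children_spans):
--     low, high = span
--     if low > high:
--         return []
--     index = {}
--     for i, child_spans in enumerate(children_spans):
--         for j, child_span in enumerate(child_spans):
--             child_low, child_high = child_span
--             index.setdefault(child_low, ((child_low, child_high), (i, j)))
--     sequence = []
--     k = low
--     while k <= high:
--         hit = index.get(k)
--         if hit is not None:
--             sequence.append(hit)
--             k = max(k + 1, hit[0][1] + 1)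
--         elif sequence and sequence[-1][1] is None:
--             sequence[-1] = ((sequence[-1][0][0], k), None)
--             k += 1
--         else:
--             sequence.append(((k, k), None))
--             k += 1
--     return sequence
-- ===== Notes on version B (the rewrite author's own statement) =====
-- stated objective: alternative
-- what changed: B builds a dict from child_low to the first matching (child span, (i,j)) once, then walks k across the span with one lookup and at most one match per step, instead of A's rescan of every child span on every while-iteration with in-sweep chaining.
-- outside the precondition, e.g. on span_child_substitution_sequence((0, 2), [[(1, -1)], [(0, 3)]]): A returns [((0, 3), (1, 0))], B returns [((0, 3), (1, 0))]
import Mathlib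
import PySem

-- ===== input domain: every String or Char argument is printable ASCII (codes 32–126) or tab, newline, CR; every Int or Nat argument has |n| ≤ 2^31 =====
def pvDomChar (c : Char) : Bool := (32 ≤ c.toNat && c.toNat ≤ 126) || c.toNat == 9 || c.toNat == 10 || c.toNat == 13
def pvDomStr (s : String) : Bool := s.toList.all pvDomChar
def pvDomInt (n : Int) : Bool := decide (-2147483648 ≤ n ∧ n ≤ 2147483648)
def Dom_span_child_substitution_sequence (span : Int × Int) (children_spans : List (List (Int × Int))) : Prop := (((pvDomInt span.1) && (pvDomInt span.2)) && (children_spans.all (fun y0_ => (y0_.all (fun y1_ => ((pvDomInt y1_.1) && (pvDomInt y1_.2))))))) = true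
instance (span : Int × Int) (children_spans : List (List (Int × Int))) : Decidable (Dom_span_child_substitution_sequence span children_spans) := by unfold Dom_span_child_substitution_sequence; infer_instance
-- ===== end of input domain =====

-- B builds a dict from child_low to the first matching (child span, (i, j)) once and walks k with O(1) lookups,
-- instead of A's rescan of every child span on every while-iteration; neither program mutates its arguments.

-- ===== PORT A =====
-- the gap step of A: `if not sequence or sequence[-1][1] is not None: append ((k,k),None) else merge into last`
def pvGapA (k : Int) (seq : List ((Int × Int) × (Option (Int × Int)))) : List ((Int × Int) × (Option (Int × Int))) :=
  match seq.getLast? with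
  | none => seq ++ [((k, k), none)]
  | some (sp, child) =>
    match child with
    | some _ => seq ++ [((k, k), none)]
    | none => seq.dropLast ++ [((sp.1, k), none)]

-- one full sweep of A's nested for-loops over enumerate(children_spans), state (k, sequence, matched)
def pvSweepA (children_spans : List (List (Int × Int)))
    (st : Int × List ((Int × Int) × (Option (Int × Int))) × Bool) :
    Int × List ((Int × Int) × (Option (Int × Int))) × Bool :=
  (PySem.List.enumerate children_spans 0).foldl (fun st e =>
    (PySem.List.enumerate e.2 0).foldl (fun st f =>
      if st.1 = f.2.1 then (f.2.2 + 1, st.2.1 ++ [((f.2.1, f.2.2), some (e.1, f.1))], true) else st) st) st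

-- the while loop; under Pre_ each iteration strictly increases k, so fuel (high+1-low).toNat is exact
def pvLoopA (children_spans : List (List (Int × Int))) (high : Int) :
    Nat → Int → List ((Int × Int) × (Option (Int × Int))) → List ((Int × Int) × (Option (Int × Int)))
  | 0, _, seq => seq
  | fuel + 1, k, seq =>
    if k ≤ high then
      let st := pvSweepA children_spans (k, seq, false)
      if st.2.2 then pvLoopA children_spans high fuel st.1 st.2.1
      else pvLoopA children_spans high fuel (st.1 + 1) (pvGapA st.1 st.2.1)
    else seq

-- fuel that covers every terminating run of the Python while loop: at each iteration start k is a fresh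
-- value of [min(low, min child_high+1), high] (a repeated k would repeat forever, as k's evolution ignores sequence)
def pvFuelA (children_spans : List (List (Int × Int))) (low high : Int) : Nat :=
  (high + 1 - children_spans.flatten.foldl (fun m c => min m (c.2 + 1)) low).toNat

def span_child_substitution_sequence (span : Int × Int) (children_spans : List (List (Int × Int))) : List ((Int × Int) × (Option (Int × Int))) :=
  pvLoopA children_spans span.2 (pvFuelA children_spans span.1 span.2) span.1 []

-- ===== PORT B =====
-- B's gap step: `elif sequence and sequence[-1][1] is None: merge; else: append`
def pvGapB (k : Int) (seq : List ((Int × Int) × (Option (Int × Int)))) : List ((Int × Int) × (Option (Int × Int))) :=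
  match seq.getLast? with
  | some ((sl, _), none) => seq.dropLast ++ [((sl, k), none)]
  | _ => seq ++ [((k, k), none)]

-- index.setdefault(child_low, ((child_low, child_high), (i, j))) over enumerate(children_spans)
def pvIndexB (children_spans : List (List (Int × Int))) : PySem.Dict Int ((Int × Int) × (Option (Int × Int))) :=
  (PySem.List.enumerate children_spans 0).foldl (fun d e =>
    (PySem.List.enumerate e.2 0).foldl (fun d f =>
      d.setdefault f.2.1 ((f.2.1, f.2.2), some (e.1, f.1))) d) PySem.Dict.empty

def pvLoopB (idx : PySem.Dict Int ((Int × Int) × (Option (Int × Int)))) (high : Int) :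
    Nat → Int → List ((Int × Int) × (Option (Int × Int))) → List ((Int × Int) × (Option (Int × Int)))
  | 0, _, seq => seq
  | fuel + 1, k, seq =>
    if k ≤ high then
      match idx.get? k with
      | some hit => pvLoopB idx high fuel (max (k + 1) (hit.1.2 + 1)) (seq ++ [hit])
      | none => pvLoopB idx high fuel (k + 1) (pvGapB k seq)
    else seq

def span_child_substitution_sequence_alt (span : Int × Int) (children_spans : List (List (Int × Int))) : List ((Int × Int) × (Option (Int × Int))) :=
  if span.2 < span.1 then []
  else pvLoopB (pvIndexB children_spans) span.2 (span.2 + 1 - span.1).toNat span.1 []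

-- ===== PRECONDITION & SPEC =====
-- Pre_ excludes inputs on which A returns but its value is an accident of its sweep mechanics (or A may diverge):
-- child spans starting inside [low,high] that are ill-formed (end < start, A can loop forever) or overhang the span,
-- a child span starting exactly at high+1, and duplicated in-span starts — on these A's in-sweep chaining can pick
-- up children beyond the span or a list-order-dependent duplicate.
def Pre_span_child_substitution_sequence (span : Int × Int) (children_spans : List (List (Int × Int))) : Prop :=
  (∀ cs ∈ children_spans, ∀ c ∈ cs,
      (span.1 ≤ c.1 ∧ c.1 ≤ span.2 → c.1 ≤ c.2 ∧ c.2 ≤ span.2) ∧ c.1 ≠ span.2 + 1)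
  ∧ ((children_spans.flatten.filter
        (fun c => decide (span.1 ≤ c.1) && decide (c.1 ≤ span.2))).map Prod.fst).Nodup

instance (span : Int × Int) (children_spans : List (List (Int × Int))) : Decidable (Pre_span_child_substitution_sequence span children_spans) := by unfold Pre_span_child_substitution_sequence; infer_instance

def pvWitness_span_child_substitution_sequence : (Int × Int) × (List (List (Int × Int))) :=
  ((0, 3), [[(0, 1)], [(2, 2)]])

def Spec_span_child_substitution_sequence (span : Int × Int) (children_spans : List (List (Int × Int))) (out : List ((Int × Int) × (Option (Int × Int)))) : Prop := out = span_child_substitution_sequence_alt span children_spans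
instance (span : Int × Int) (children_spans : List (List (Int × Int))) (out : List ((Int × Int) × (Option (Int × Int)))) : Decidable (Spec_span_child_substitution_sequence span children_spans out) := by unfold Spec_span_child_substitution_sequence; infer_instance

-- ===== CLAIM (what is proved, stated in full; the proofs are below) =====
def Claim_equal_span_child_substitution_sequence : Prop := ∀ (span : Int × Int) (children_spans : List (List (Int × Int))), Dom_span_child_substitution_sequence span children_spans → Pre_span_child_substitution_sequence span children_spans → Spec_span_child_substitution_sequence span children_spans (span_child_substitution_sequence span children_spans)

-- ===== LEMMAS AND PROOFS =====

-- the two gap steps are the same function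
theorem pvGap_eq (k : Int) (seq : List ((Int × Int) × (Option (Int × Int)))) : pvGapB k seq = pvGapA k seq := by
  unfold pvGapA pvGapB
  rcases h : seq.getLast? with _ | ⟨⟨sl, sh⟩, _ | c⟩ <;> simp

-- the flattened children with their python indices, in A's scan order
def pvFlat (children_spans : List (List (Int × Int))) : List ((Int × Int) × (Option (Int × Int))) :=
  (PySem.List.enumerate children_spans 0).flatMap (fun e =>
    (PySem.List.enumerate e.2 0).map (fun f => ((f.2.1, f.2.2), some (e.1, f.1))))

def pvStep (st : Int × List ((Int × Int) × (Option (Int × Int))) × Bool)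
    (x : (Int × Int) × (Option (Int × Int))) : Int × List ((Int × Int) × (Option (Int × Int))) × Bool :=
  if st.1 = x.1.1 then (x.1.2 + 1, st.2.1 ++ [x], true) else st

theorem pvSweepA_eq_flat (children_spans : List (List (Int × Int))) (st) :
    pvSweepA children_spans st = (pvFlat children_spans).foldl pvStep st := by
  unfold pvSweepA pvFlat
  rw [List.foldl_flatMap]
  refine PySem.List.foldl_congr_mem _ _ _ _ (fun acc e _ => ?_)
  rw [List.foldl_map]
  rfl

theorem pvFlat_aux_map_fst (l : List (List (Int × Int))) (s : Int) :
    ((PySem.List.enumerate l s).flatMap (fun e =>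
       (PySem.List.enumerate e.2 0).map (fun f => ((f.2.1, f.2.2), some (e.1, f.1))))).map (fun x => x.1)
      = l.flatten := by
  induction l generalizing s with
  | nil => rfl
  | cons c t ih =>
    rw [PySem.List.enumerate_cons]
    simp only [List.flatMap_cons, List.map_append, List.flatten_cons]
    rw [ih]
    congr 1
    rw [List.map_map]
    have hc : ((fun (x : (Int × Int) × Option (Int × Int)) => x.1) ∘
        (fun (f : Int × (Int × Int)) => ((f.2.1, f.2.2), some (s, f.1)))) = (fun f => f.2) := by
      funext f; simp [Function.comp]
    rw [hc, PySem.List.map_snd_enumerate]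

theorem pvFlat_map_fst (children_spans : List (List (Int × Int))) :
    (pvFlat children_spans).map (fun x => x.1) = children_spans.flatten := by
  unfold pvFlat
  exact pvFlat_aux_map_fst children_spans 0

theorem pvIndexB_eq_flat (children_spans : List (List (Int × Int))) :
    pvIndexB children_spans
      = (pvFlat children_spans).foldl (fun d x => d.setdefault x.1.1 x) PySem.Dict.empty := by
  unfold pvIndexB pvFlat
  rw [List.foldl_flatMap]
  refine PySem.List.foldl_congr_mem _ _ _ _ (fun acc e _ => ?_)
  rw [List.foldl_map]

theorem get?_foldl_setdefault (l : List ((Int × Int) × (Option (Int × Int))))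
    (d : PySem.Dict Int ((Int × Int) × (Option (Int × Int)))) (k : Int) :
    (l.foldl (fun d x => d.setdefault x.1.1 x) d).get? k
      = (d.get? k).or (l.find? (fun x => x.1.1 == k)) := by
  induction l generalizing d with
  | nil => simp
  | cons x t ih =>
    simp only [List.foldl_cons]
    rw [ih]
    by_cases h : x.1.1 = k
    · subst h
      rw [PySem.Dict.get?_setdefault_self]
      rw [List.find?_cons_of_pos (by simp)]
      cases hd : d.get? x.1.1 <;> simp [Option.or]
    · rw [PySem.Dict.get?_setdefault_of_ne _ _ (Ne.symm h)]
      rw [List.find?_cons_of_neg (by simp [h])]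

theorem pvIndexB_get? (children_spans : List (List (Int × Int))) (k : Int) :
    (pvIndexB children_spans).get? k = (pvFlat children_spans).find? (fun x => x.1.1 == k) := by
  rw [pvIndexB_eq_flat, get?_foldl_setdefault]
  simp

theorem sweep_no_match {k : Int} (L : List ((Int × Int) × (Option (Int × Int))))
    (h : ∀ x ∈ L, x.1.1 ≠ k) (seq) (m : Bool) :
    L.foldl pvStep (k, seq, m) = (k, seq, m) := by
  induction L with
  | nil => rfl
  | cons x t ih =>
    have hx : x.1.1 ≠ k := h x (by simp)
    simp only [List.foldl_cons, pvStep]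
    rw [if_neg (by exact fun hh => hx hh.symm)]
    exact ih (fun y hy => h y (by simp [hy]))

theorem pvLoopA_exit (children_spans : List (List (Int × Int))) (high : Int)
    (f : Nat) (k : Int) (seq) (h : high < k) : pvLoopA children_spans high f k seq = seq := by
  cases f with
  | zero => rfl
  | succ n => simp only [pvLoopA]; rw [if_neg (by omega)]

theorem foldl_min_le_init (l : List (Int × Int)) (a : Int) :
    l.foldl (fun m c => min m (c.2 + 1)) a ≤ a := by
  induction l generalizing a with
  | nil => simp
  | cons c t ih =>
    simp only [List.foldl_cons]
    exact le_trans (ih _) (min_le_left _ _)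

theorem pvLoopB_exit (idx : PySem.Dict Int ((Int × Int) × (Option (Int × Int)))) (high : Int)
    (f : Nat) (k : Int) (seq) (h : high < k) : pvLoopB idx high f k seq = seq := by
  cases f with
  | zero => rfl
  | succ n => simp only [pvLoopB]; rw [if_neg (by omega)]

theorem pvLoopB_mono (low high : Int) (F : List ((Int × Int) × (Option (Int × Int))))
    (idx : PySem.Dict Int ((Int × Int) × (Option (Int × Int))))
    (HF : ∀ x ∈ F, (low ≤ x.1.1 → x.1.1 ≤ high → x.1.1 ≤ x.1.2 ∧ x.1.2 ≤ high) ∧ x.1.1 ≠ high + 1)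
    (Hidx : ∀ k, idx.get? k = F.find? (fun x => x.1.1 == k)) :
    ∀ f1 f2 k seq, low ≤ k → (high + 1 - k).toNat ≤ f1 → (high + 1 - k).toNat ≤ f2 →
      pvLoopB idx high f1 k seq = pvLoopB idx high f2 k seq := by
  intro f1
  induction f1 with
  | zero =>
    intro f2 k seq hlk h1 h2
    rw [pvLoopB_exit _ _ _ _ _ (by omega), pvLoopB_exit _ _ _ _ _ (by omega)]
  | succ n ih =>
    intro f2 k seq hlk h1 h2
    by_cases hk : k ≤ high
    · obtain ⟨m, rfl⟩ : ∃ m, f2 = m + 1 := ⟨f2 - 1, by omega⟩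
      simp only [pvLoopB, if_pos hk]
      cases hg : idx.get? k with
      | none => exact ih m (k + 1) _ (by omega) (by omega) (by omega)
      | some hit =>
        have hgf : F.find? (fun x => x.1.1 == k) = some hit := (Hidx k) ▸ hg
        have hmem := List.mem_of_find?_eq_some hgf
        have hpk : hit.1.1 = k := by simpa using List.find?_some hgf
        have hb := (HF hit hmem).1 (by omega) (by omega)
        exact ih m (max (k + 1) (hit.1.2 + 1)) _ (by omega) (by omega) (by omega)
    · rw [pvLoopB_exit _ _ _ _ _ (by omega), pvLoopB_exit _ _ _ _ _ (by omega)]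

theorem pvSweep_true (low high : Int) (F : List ((Int × Int) × (Option (Int × Int))))
    (idx : PySem.Dict Int ((Int × Int) × (Option (Int × Int))))
    (HF : ∀ x ∈ F, (low ≤ x.1.1 → x.1.1 ≤ high → x.1.1 ≤ x.1.2 ∧ x.1.2 ≤ high) ∧ x.1.1 ≠ high + 1)
    (HU : ∀ x ∈ F, ∀ y ∈ F, low ≤ x.1.1 → x.1.1 ≤ high → x.1.1 = y.1.1 → x = y)
    (Hidx : ∀ k, idx.get? k = F.find? (fun x => x.1.1 == k)) :
    ∀ (L : List ((Int × Int) × (Option (Int × Int)))), (∀ x ∈ L, x ∈ F) →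
      ∀ k seq, low ≤ k → k ≤ high + 1 →
      ∃ k'' seq'', L.foldl pvStep (k, seq, true) = (k'', seq'', true) ∧ k ≤ k'' ∧ k'' ≤ high + 1 ∧
        (∀ f f'', (high + 1 - k).toNat ≤ f → (high + 1 - k'').toNat ≤ f'' →
          pvLoopB idx high f k seq = pvLoopB idx high f'' k'' seq'') := by
  intro L
  induction L with
  | nil =>
    intro _ k seq hlk hkh
    exact ⟨k, seq, rfl, le_refl _, hkh,
      fun f f'' h1 h2 => pvLoopB_mono low high F idx HF Hidx f f'' k seq hlk h1 h2⟩
  | cons x t ih =>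
    intro hsub k seq hlk hkh
    have hxF : x ∈ F := hsub x (by simp)
    by_cases hx : k = x.1.1
    · have hne : x.1.1 ≠ high + 1 := (HF x hxF).2
      have hkhi : k ≤ high := by omega
      have hb := (HF x hxF).1 (by omega) (by omega)
      have hstep : pvStep (k, seq, true) x = (x.1.2 + 1, seq ++ [x], true) := by
        simp only [pvStep]; rw [if_pos hx]
      obtain ⟨k'', seq'', heq, hge, hle, hrun⟩ :=
        ih (fun y hy => hsub y (List.mem_cons_of_mem _ hy)) (x.1.2 + 1) (seq ++ [x]) (by omega) (by omega)
      refine ⟨k'', seq'', ?_, by omega, hle, ?_⟩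
      · rw [List.foldl_cons, hstep]; exact heq
      · intro f f'' h1 h2
        obtain ⟨n, rfl⟩ : ∃ n, f = n + 1 := ⟨f - 1, by omega⟩
        have hfind : F.find? (fun y => y.1.1 == k) = some x := by
          cases hg : F.find? (fun y => y.1.1 == k) with
          | none =>
            have hcon := List.find?_eq_none.mp hg x hxF
            exact absurd (show ((fun (y : (Int × Int) × Option (Int × Int)) => y.1.1 == k) x) = true by simp [hx]) hcon
          | some y =>
            have hyF := List.mem_of_find?_eq_some hg
            have hy1 : y.1.1 = k := by simpa using List.find?_some hg
            have hxy : x = y := HU x hxF y hyF (by omega) (by omega) (by omega)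
            rw [hxy]
        simp only [pvLoopB, if_pos hkhi, Hidx k, hfind]
        have hmax : max (k + 1) (x.1.2 + 1) = x.1.2 + 1 := by omega
        rw [hmax]
        exact hrun n f'' (by omega) h2
    · have hstep : pvStep (k, seq, true) x = (k, seq, true) := by
        simp only [pvStep]; rw [if_neg hx]
      obtain ⟨k'', seq'', heq, hge, hle, hrun⟩ :=
        ih (fun y hy => hsub y (List.mem_cons_of_mem _ hy)) k seq hlk hkh
      exact ⟨k'', seq'', by rw [List.foldl_cons, hstep]; exact heq, hge, hle, hrun⟩

theorem pvLoopA_eq_pvLoopB (low high : Int) (children_spans : List (List (Int × Int)))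
    (HF : ∀ x ∈ pvFlat children_spans,
        (low ≤ x.1.1 → x.1.1 ≤ high → x.1.1 ≤ x.1.2 ∧ x.1.2 ≤ high) ∧ x.1.1 ≠ high + 1)
    (HU : ∀ x ∈ pvFlat children_spans, ∀ y ∈ pvFlat children_spans,
        low ≤ x.1.1 → x.1.1 ≤ high → x.1.1 = y.1.1 → x = y) :
    ∀ fuel k seq, low ≤ k → k ≤ high + 1 → (high + 1 - k).toNat ≤ fuel →
      pvLoopA children_spans high fuel k seq = pvLoopB (pvIndexB children_spans) high fuel k seq := by
  intro fuel
  induction fuel with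
  | zero => intro k seq _ _ _; rfl
  | succ n ih =>
    intro k seq hlk hkh hfuel
    by_cases hk : k ≤ high
    · simp only [pvLoopA, pvLoopB, if_pos hk]
      rw [pvSweepA_eq_flat]
      cases hg : (pvIndexB children_spans).get? k with
      | none =>
        have hnone : (pvFlat children_spans).find? (fun x => x.1.1 == k) = none :=
          (pvIndexB_get? children_spans k) ▸ hg
        have hno : ∀ x ∈ pvFlat children_spans, x.1.1 ≠ k := by
          intro x hxm
          simpa using List.find?_eq_none.mp hnone x hxm
        rw [sweep_no_match _ hno]
        rw [pvGap_eq]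
        exact ih (k + 1) _ (by omega) (by omega) (by omega)
      | some x =>
        have hfind : (pvFlat children_spans).find? (fun y => y.1.1 == k) = some x :=
          (pvIndexB_get? children_spans k) ▸ hg
        obtain ⟨hpx, P, S, hFeq, hP⟩ := List.find?_eq_some_iff_append.mp hfind
        have hx1 : x.1.1 = k := by simpa using hpx
        have hxF : x ∈ pvFlat children_spans := by rw [hFeq]; simp
        have hb := (HF x hxF).1 (by omega) (by omega)
        rw [hFeq, List.foldl_append, List.foldl_cons]
        rw [sweep_no_match P (fun a ha => by simpa using hP a ha) seq false]
        have hstep : pvStep (k, seq, false) x = (x.1.2 + 1, seq ++ [x], true) := by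
          simp only [pvStep]; rw [if_pos hx1.symm]
        rw [hstep]
        have hsubS : ∀ y ∈ S, y ∈ pvFlat children_spans := by
          intro y hy; rw [hFeq]; simp [hy]
        obtain ⟨k'', seq'', heq, hge, hle, hrun⟩ :=
          pvSweep_true low high _ _ HF HU (pvIndexB_get? children_spans) S hsubS
            (x.1.2 + 1) (seq ++ [x]) (by omega) (by omega)
        rw [heq]
        dsimp only
        rw [if_pos rfl]
        have hmax : max (k + 1) (x.1.2 + 1) = x.1.2 + 1 := by omega
        rw [hmax, ih k'' seq'' (by omega) hle (by omega)]
        exact (hrun n n (by omega) (by omega)).symm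
    · simp only [pvLoopA, pvLoopB, if_neg hk]

-- ===== VERDICT (by name: the statement is the Claim_ definition above) =====
theorem span_child_substitution_sequence_spec : Claim_equal_span_child_substitution_sequence := by
  intro span children_spans _ hpre
  obtain ⟨low, high⟩ := span
  unfold Spec_span_child_substitution_sequence
  unfold span_child_substitution_sequence span_child_substitution_sequence_alt
  by_cases hhl : high < low
  · rw [if_pos hhl]
    exact pvLoopA_exit children_spans high _ low [] hhl
  · rw [if_neg hhl]
    have hlh : low ≤ high + 1 := by omega
    have hfa : (high + 1 - low).toNat ≤ pvFuelA children_spans low high := by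
      unfold pvFuelA
      have := foldl_min_le_init children_spans.flatten low
      omega
    have hmemflat : ∀ x ∈ pvFlat children_spans, x.1 ∈ children_spans.flatten := by
      intro x hx
      rw [← pvFlat_map_fst children_spans]
      exact List.mem_map_of_mem hx
    have HF : ∀ x ∈ pvFlat children_spans,
        (low ≤ x.1.1 → x.1.1 ≤ high → x.1.1 ≤ x.1.2 ∧ x.1.2 ≤ high) ∧ x.1.1 ≠ high + 1 := by
      intro x hx
      obtain ⟨cs, hcs, hc⟩ := List.mem_flatten.mp (hmemflat x hx)
      have h := hpre.1 cs hcs x.1 hc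
      exact ⟨fun h1 h2 => h.1 ⟨h1, h2⟩, h.2⟩
    have hnodup' : (((pvFlat children_spans).filter
        (fun x => decide (low ≤ x.1.1) && decide (x.1.1 ≤ high))).map (fun x => x.1.1)).Nodup := by
      have h2 := hpre.2
      have heq : (((pvFlat children_spans).filter
            (fun x => decide (low ≤ x.1.1) && decide (x.1.1 ≤ high))).map (fun x => x.1.1))
          = ((children_spans.flatten.filter
            (fun c => decide (low ≤ c.1) && decide (c.1 ≤ high))).map Prod.fst) := by
        rw [← pvFlat_map_fst children_spans, List.filter_map, List.map_map]
        rfl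
      rw [heq]
      exact h2
    have HU : ∀ x ∈ pvFlat children_spans, ∀ y ∈ pvFlat children_spans,
        low ≤ x.1.1 → x.1.1 ≤ high → x.1.1 = y.1.1 → x = y := by
      intro x hx y hy h1 h2 hxy
      refine List.inj_on_of_nodup_map hnodup' ?_ ?_ hxy
      · exact List.mem_filter.mpr ⟨hx, by simp only [Bool.and_eq_true, decide_eq_true_eq]; omega⟩
      · exact List.mem_filter.mpr ⟨hy, by simp only [Bool.and_eq_true, decide_eq_true_eq]; omega⟩
    exact (pvLoopA_eq_pvLoopB low high children_spans HF HU (pvFuelA children_spans low high) low [] (le_refl _) hlh hfa).trans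
      (pvLoopB_mono low high (pvFlat children_spans) (pvIndexB children_spans) HF
        (pvIndexB_get? children_spans) (pvFuelA children_spans low high) (high + 1 - low).toNat low []
        (le_refl _) hfa (le_refl _))
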